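-- pv_equiv track=rewrite | github.com/white-lab/pyproteome | pyproteome/analysis/correlation.py | _remove_lesser_dups
-- ===== SOURCE A (Python) =====
-- def _remove_lesser_dups(labels, compress_sym=False):
--     new_labels = []
--     labels = list(labels)
--
--     for index, (x, y, label) in enumerate(labels):
--         for o_index, (o_x, o_y, o_label) in enumerate(labels):
--             if index == o_index:
--                 continue
--             if label != o_label:
--                 continue
--             if not compress_sym and (y < 0) != (y < 0):
--                 continue
--
--             mul = 1 if y >= 0 else -1
--             o_mul = 1 if o_y >= 0 else -1
--
--             if (
--                 mul * y < o_mul * o_y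
--             ) or (
--                 (
--                     mul * y <= o_mul * o_y
--                 ) and
--                 index < o_index
--             ):
--                 break
--         else:
--             new_labels.append((x, y, label))
--
--     return new_labels
-- ===== SOURCE B (Python) =====
-- def _remove_lesser_dups(labels, compress_sym=False):
--     labels = list(labels)
--     best = {}  # label -> (magnitude, index) of the winning entry; ties go to the later index
--     for i, (x, y, label) in enumerate(labels):
--         mag = abs(y)
--         if label not in best or mag >= best[label][0]:
--             best[label] = (mag, i)
--     return [t for i, t in enumerate(labels) if best[t[2]][1] == i]
-- ===== Notes on version B (the rewrite author's own statement) =====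
-- stated objective: faster
-- what changed: Replaces the all-pairs nested scan with a single dict pass tracking the best (magnitude, index) per label, then one output pass keeping each label's winner; the inner scan disappears.
import Mathlib
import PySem

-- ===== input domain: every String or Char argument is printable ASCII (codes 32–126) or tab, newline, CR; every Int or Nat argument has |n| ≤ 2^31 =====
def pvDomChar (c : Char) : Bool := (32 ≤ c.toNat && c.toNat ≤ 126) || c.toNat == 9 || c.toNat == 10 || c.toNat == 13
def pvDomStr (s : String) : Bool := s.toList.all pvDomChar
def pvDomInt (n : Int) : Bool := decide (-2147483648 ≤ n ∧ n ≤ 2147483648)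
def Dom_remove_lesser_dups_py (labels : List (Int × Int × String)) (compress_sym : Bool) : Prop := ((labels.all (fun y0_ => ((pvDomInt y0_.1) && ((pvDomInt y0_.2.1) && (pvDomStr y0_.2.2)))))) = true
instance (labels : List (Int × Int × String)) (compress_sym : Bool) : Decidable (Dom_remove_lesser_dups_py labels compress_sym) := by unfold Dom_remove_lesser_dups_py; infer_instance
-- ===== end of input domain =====

-- B replaces A's O(n^2) all-pairs scan by one dict pass (best magnitude/index per label) plus one output pass.

-- ===== PORT A =====
-- inner 'for o_index, (o_x, o_y, o_label) in enumerate(labels): … break / else' loop: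
-- returns true iff the break fires for the element (index, (x, y, label))
def pvBreaks (compress_sym : Bool) (index y : Int) (label : String) :
    List (Int × (Int × Int × String)) → Bool
  | [] => false
  | (o_index, (_, o_y, o_label)) :: rest =>
    if index == o_index then pvBreaks compress_sym index y label rest
    else if label != o_label then pvBreaks compress_sym index y label rest
    else if (!compress_sym) && (decide (y < 0) != decide (y < 0)) then
      pvBreaks compress_sym index y label rest
    else
      let mul : Int := if y ≥ 0 then 1 else -1
      let o_mul : Int := if o_y ≥ 0 then 1 else -1
      if mul * y < o_mul * o_y || (mul * y ≤ o_mul * o_y && index < o_index) then true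
      else pvBreaks compress_sym index y label rest

def remove_lesser_dups_py (labels : List (Int × Int × String)) (compress_sym : Bool) :
    List (Int × Int × String) :=
  (PySem.List.enumerate labels 0).foldl
    (fun new_labels p =>
      if pvBreaks compress_sym p.1 p.2.2.1 p.2.2.2 (PySem.List.enumerate labels 0) then new_labels
      else new_labels ++ [p.2])
    []

-- ===== PORT B =====
-- one step of the dict pass: 'if label not in best or mag >= best[label][0]: best[label] = (mag, i)'
def pvBestStep (d : PySem.Dict String (Int × Int)) (p : Int × (Int × Int × String)) :
    PySem.Dict String (Int × Int) :=
  match d.get? p.2.2.2 with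
  | none => d.insert p.2.2.2 (|p.2.2.1|, p.1)
  | some b => if |p.2.2.1| ≥ b.1 then d.insert p.2.2.2 (|p.2.2.1|, p.1) else d

def remove_lesser_dups_py_alt (labels : List (Int × Int × String)) (compress_sym : Bool) :
    List (Int × Int × String) :=
  let best := (PySem.List.enumerate labels 0).foldl pvBestStep PySem.Dict.empty
  -- '[t for i, t in enumerate(labels) if best[t[2]][1] == i]' ; the key t[2] is always present
  (PySem.List.enumerate labels 0).filterMap
    (fun p =>
      match best.get? p.2.2.2 with
      | some b => if b.2 == p.1 then some p.2 else none
      | none => none)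

-- ===== PRECONDITION & SPEC =====
def Spec_remove_lesser_dups_py (labels : List (Int × Int × String)) (compress_sym : Bool) (out : List (Int × Int × String)) : Prop := out = remove_lesser_dups_py_alt labels compress_sym
instance (labels : List (Int × Int × String)) (compress_sym : Bool) (out : List (Int × Int × String)) : Decidable (Spec_remove_lesser_dups_py labels compress_sym out) := by unfold Spec_remove_lesser_dups_py; infer_instance

-- ===== CLAIM (what is proved, stated in full; the proofs are below) =====
def Claim_equal_remove_lesser_dups_py : Prop := ∀ (labels : List (Int × Int × String)) (compress_sym : Bool), Dom_remove_lesser_dups_py labels compress_sym → Spec_remove_lesser_dups_py labels compress_sym (remove_lesser_dups_py labels compress_sym)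

-- ===== LEMMAS AND PROOFS =====

-- the break condition of A's inner loop, as a predicate on one enumerated element
def pvBrk (i y : Int) (l : String) (p : Int × (Int × Int × String)) : Bool :=
  p.1 != i && p.2.2.2 == l && (|y| < |p.2.2.1| || (|y| ≤ |p.2.2.1| && i < p.1))

theorem pv_mul_abs (y : Int) : (if y ≥ 0 then (1 : Int) else -1) * y = |y| := by
  by_cases h : 0 ≤ y
  · simp [h, abs_of_nonneg h]
  · simp [h, abs_of_neg (lt_of_not_ge h)]

theorem pv_if_true_left (c b : Bool) : (if c then true else b) = (c || b) := by
  cases c <;> simp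

theorem pvBreaks_eq_any (cs : Bool) (i y : Int) (l : String)
    (L : List (Int × (Int × Int × String))) :
    pvBreaks cs i y l L = L.any (pvBrk i y l) := by
  induction L with
  | nil => simp [pvBreaks]
  | cons a rest ih =>
    obtain ⟨oi, ox, oy, ol⟩ := a
    simp only [pvBreaks, pv_mul_abs, List.any_cons, ih, pvBrk, bne_self_eq_false,
      Bool.and_false]
    by_cases h1 : i = oi
    · simp [h1]
    · by_cases h2 : l = ol
      · have hne : (oi != i) = true := by simp [Ne.symm h1]
        simp [h1, h2, hne, pv_if_true_left]
      · simp [h1, h2, Ne.symm h1, Ne.symm h2]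

-- per-label view of one dict step
def pvGStep (l : String) (b : Option (Int × Int)) (p : Int × (Int × Int × String)) :
    Option (Int × Int) :=
  if p.2.2.2 = l then
    match b with
    | none => some (|p.2.2.1|, p.1)
    | some q => if |p.2.2.1| ≥ q.1 then some (|p.2.2.1|, p.1) else some q
  else b

theorem pvBestStep_get? (d : PySem.Dict String (Int × Int)) (p : Int × (Int × Int × String))
    (l : String) : (pvBestStep d p).get? l = pvGStep l (d.get? l) p := by
  unfold pvBestStep pvGStep
  by_cases h : p.2.2.2 = l
  · subst h
    cases hd : PySem.Dict.get? d p.2.2.2 with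
    | none => simp [PySem.Dict.get?_insert_self]
    | some q =>
      by_cases hm : |p.2.2.1| ≥ q.1 <;> simp [hd, hm, PySem.Dict.get?_insert_self]
  · have hl : l ≠ p.2.2.2 := fun e => h e.symm
    cases hd : PySem.Dict.get? d p.2.2.2 with
    | none => simp [h, PySem.Dict.get?_insert, hl]
    | some q =>
      by_cases hm : |p.2.2.1| ≥ q.1 <;> simp [h, hm, PySem.Dict.get?_insert, hl]

theorem pvBest_get? (L : List (Int × (Int × Int × String))) (d : PySem.Dict String (Int × Int))
    (l : String) : (L.foldl pvBestStep d).get? l = L.foldl (pvGStep l) (d.get? l) := by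
  induction L generalizing d with
  | nil => rfl
  | cons a rest ih => simp only [List.foldl_cons, ih, pvBestStep_get?]

def pvGoodSome (L : List (Int × (Int × Int × String))) (l : String) (m j : Int) : Prop :=
  (∃ p ∈ L, p.1 = j ∧ p.2.2.2 = l ∧ |p.2.2.1| = m) ∧
  (∀ p ∈ L, p.2.2.2 = l → |p.2.2.1| < m ∨ (|p.2.2.1| = m ∧ p.1 ≤ j))

theorem pvG_char (L : List (Int × (Int × Int × String)))
    (hp : L.Pairwise (fun p q => p.1 < q.1)) (l : String) :
    (L.foldl (pvGStep l) none = none → ∀ p ∈ L, p.2.2.2 ≠ l) ∧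
    (∀ m j, L.foldl (pvGStep l) none = some (m, j) → pvGoodSome L l m j) := by
  induction L using List.reverseRecOn with
  | nil => exact ⟨fun _ p hp => absurd hp (List.not_mem_nil), fun m j h => by simp at h⟩
  | append_singleton L a ih =>
    rw [List.pairwise_append] at hp
    obtain ⟨hpL, -, hlt⟩ := hp
    have hlt' : ∀ p ∈ L, p.1 < a.1 := fun p hp => hlt p hp a (List.mem_singleton_self a)
    specialize ih hpL
    rw [List.foldl_append, List.foldl_cons, List.foldl_nil]
    by_cases ha : a.2.2.2 = l
    · cases hg : L.foldl (pvGStep l) none with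
      | none =>
        refine ⟨fun h => by simp [pvGStep, ha] at h, fun m j h => ?_⟩
        simp only [pvGStep, ha, if_true, Option.some.injEq, Prod.mk.injEq] at h
        obtain ⟨hm, hj⟩ := h
        refine ⟨⟨a, List.mem_append_right _ (List.mem_singleton_self a), hj, ha, hm⟩,
          fun p hp hpl => ?_⟩
        rcases List.mem_append.mp hp with hp | hp
        · exact absurd hpl (ih.1 hg p hp)
        · rw [List.mem_singleton.mp hp]; exact Or.inr ⟨hm, hj ▸ le_refl _⟩
      | some b =>
        obtain ⟨m0, j0⟩ := b
        have hgood := ih.2 m0 j0 hg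
        obtain ⟨⟨q, hqL, hq1, hq2, hq3⟩, hall⟩ := hgood
        by_cases hm : |a.2.2.1| ≥ m0
        · refine ⟨fun h => by simp [pvGStep, ha, hm] at h, fun m j h => ?_⟩
          simp only [pvGStep, ha, if_true, hm, Option.some.injEq, Prod.mk.injEq] at h
          obtain ⟨hm', hj⟩ := h
          refine ⟨⟨a, List.mem_append_right _ (List.mem_singleton_self a), hj, ha, hm'⟩,
            fun p hp hpl => ?_⟩
          rcases List.mem_append.mp hp with hp | hp
          · rcases hall p hp hpl with h1 | ⟨h1, h2⟩
            · exact Or.inl (by omega)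
            · have := hlt' p hp
              rcases lt_or_eq_of_le hm with h3 | h3
              · exact Or.inl (by omega)
              · exact Or.inr ⟨by omega, by omega⟩
          · rw [List.mem_singleton.mp hp]; exact Or.inr ⟨hm', hj ▸ le_refl _⟩
        · refine ⟨fun h => by simp [pvGStep, ha, hm] at h, fun m j h => ?_⟩
          simp only [pvGStep, ha, if_true, if_neg hm, Option.some.injEq, Prod.mk.injEq] at h
          obtain ⟨hm', hj⟩ := h
          subst hm'; subst hj
          refine ⟨⟨q, List.mem_append_left _ hqL, hq1, hq2, hq3⟩, fun p hp hpl => ?_⟩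
          rcases List.mem_append.mp hp with hp | hp
          · exact hall p hp hpl
          · rw [List.mem_singleton.mp hp]; exact Or.inl (by omega)
    · have hstep : pvGStep l (L.foldl (pvGStep l) none) a = L.foldl (pvGStep l) none := by
        simp [pvGStep, ha]
      rw [hstep]
      refine ⟨fun h p hp => ?_, fun m j h => ?_⟩
      · rcases List.mem_append.mp hp with hp | hp
        · exact ih.1 h p hp
        · rw [List.mem_singleton.mp hp]; exact ha
      · obtain ⟨⟨q, hqL, hq1, hq2, hq3⟩, hall⟩ := ih.2 m j h
        refine ⟨⟨q, List.mem_append_left _ hqL, hq1, hq2, hq3⟩, fun p hp hpl => ?_⟩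
        rcases List.mem_append.mp hp with hp | hp
        · exact hall p hp hpl
        · rw [List.mem_singleton.mp hp] at hpl; exact absurd hpl ha

theorem pv_enum_inj (labels : List (Int × Int × String)) {p q : Int × (Int × Int × String)}
    (hp : p ∈ PySem.List.enumerate labels 0) (hq : q ∈ PySem.List.enumerate labels 0)
    (h : p.1 = q.1) : p = q := by
  rw [PySem.List.mem_enumerate_iff] at hp hq
  obtain ⟨k, hk, rfl⟩ := hp
  obtain ⟨k', hk', rfl⟩ := hq
  have : k = k' := by simpa using h
  subst this
  rfl

theorem pv_filterMap_eq {α β : Type} (L : List α) (c : α → Bool) (f : α → β) :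
    L.filterMap (fun p => if c p then some (f p) else none) = (L.filter c).map f := by
  induction L with
  | nil => rfl
  | cons a rest ih => by_cases h : c a <;> simp [h, ih]

-- the per-element keep test of B, as a Bool
def pvKeepB (best : PySem.Dict String (Int × Int)) (p : Int × (Int × Int × String)) : Bool :=
  match best.get? p.2.2.2 with
  | some b => b.2 == p.1
  | none => false

theorem pv_core (cs : Bool) (L : List (Int × (Int × Int × String)))
    (hpair : L.Pairwise (fun p q => p.1 < q.1))
    (hinj : ∀ p ∈ L, ∀ q ∈ L, p.1 = q.1 → p = q) :
    L.foldl (fun acc p => if pvBreaks cs p.1 p.2.2.1 p.2.2.2 L then acc else acc ++ [p.2]) [] =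
    L.filterMap (fun p =>
      match (L.foldl pvBestStep PySem.Dict.empty).get? p.2.2.2 with
      | some b => if b.2 == p.1 then some p.2 else none
      | none => none) := by
  have hfun : (fun (acc : List (Int × Int × String)) (p : Int × (Int × Int × String)) =>
        if pvBreaks cs p.1 p.2.2.1 p.2.2.2 L then acc else acc ++ [p.2])
      = (fun (acc : List (Int × Int × String)) (p : Int × (Int × Int × String)) => if (!pvBreaks cs p.1 p.2.2.1 p.2.2.2 L) then acc ++ [p.2] else acc) := by
    funext acc p
    by_cases h : pvBreaks cs p.1 p.2.2.1 p.2.2.2 L <;> simp [h]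
  have hmatch : (fun (p : Int × (Int × Int × String)) =>
        match (L.foldl pvBestStep PySem.Dict.empty).get? p.2.2.2 with
        | some b => if b.2 == p.1 then some p.2 else none
        | none => none)
      = (fun p => if pvKeepB (L.foldl pvBestStep PySem.Dict.empty) p then some p.2 else none) := by
    funext p
    unfold pvKeepB
    cases (L.foldl pvBestStep PySem.Dict.empty).get? p.2.2.2 with
    | none => rfl
    | some b => by_cases h : b.2 == p.1 <;> simp [h]
  rw [hfun, PySem.List.foldl_append_if, hmatch, pv_filterMap_eq, List.nil_append]
  have hfc : L.filter (fun p => !pvBreaks cs p.1 p.2.2.1 p.2.2.2 L)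
      = L.filter (pvKeepB (L.foldl pvBestStep PySem.Dict.empty)) := by
    apply List.filter_congr
    intro p hp
    rw [pvBreaks_eq_any]
    unfold pvKeepB
    have hget : (L.foldl pvBestStep PySem.Dict.empty).get? p.2.2.2
        = L.foldl (pvGStep p.2.2.2) none := by
      rw [pvBest_get?]
      rfl
    rw [hget]
    cases hg : L.foldl (pvGStep p.2.2.2) none with
    | none => exact absurd rfl ((pvG_char L hpair _).1 hg p hp)
    | some b =>
      obtain ⟨m, j⟩ := b
      obtain ⟨⟨q, hqL, hq1, hq2, hq3⟩, hall⟩ := (pvG_char L hpair _).2 m j hg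
      by_cases hj : j = p.1
      · have hqp : q = p := hinj q hqL p hp (hq1.trans hj)
        have hm : |p.2.2.1| = m := by rw [hqp] at hq3; exact hq3
        have hany : L.any (pvBrk p.1 p.2.2.1 p.2.2.2) = false := by
          rw [List.any_eq_false]
          intro r hr
          by_cases hr1 : r.1 = p.1
          · simp [pvBrk, hr1]
          · by_cases hr2 : r.2.2.2 = p.2.2.2
            · rcases hall r hr hr2 with h4 | ⟨h4, h5⟩
              · have e1 : ¬ |p.2.2.1| < |r.2.2.1| := by omega
                have e2 : ¬ |p.2.2.1| ≤ |r.2.2.1| := by omega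
                simp [pvBrk, e1, e2]
              · have e1 : ¬ |p.2.2.1| < |r.2.2.1| := by omega
                have e2 : ¬ p.1 < r.1 := by omega
                simp [pvBrk, e1, e2]
            · simp [pvBrk, hr2]
        simp [hany, hj]
      · have hq1p : q.1 ≠ p.1 := fun e => hj (hq1 ▸ e)
        have hcond : |p.2.2.1| < |q.2.2.1| ∨ (|p.2.2.1| ≤ |q.2.2.1| ∧ p.1 < q.1) := by
          rcases hall p hp rfl with h1 | ⟨h1, h2⟩
          · left; omega
          · right; omega
        have hbrk : pvBrk p.1 p.2.2.1 p.2.2.2 q = true := by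
          rcases hcond with h1 | ⟨h1, h2⟩
          · simp [pvBrk, hq1p, hq2, h1]
          · simp [pvBrk, hq1p, hq2, h1, h2]
        have hany : L.any (pvBrk p.1 p.2.2.1 p.2.2.2) = true :=
          List.any_eq_true.mpr ⟨q, hqL, hbrk⟩
        simp [hany, hj]
  rw [hfc]

-- ===== VERDICT (by name: the statement is the Claim_ definition above) =====
theorem remove_lesser_dups_py_spec : Claim_equal_remove_lesser_dups_py := by
  intro labels cs _
  unfold Spec_remove_lesser_dups_py remove_lesser_dups_py remove_lesser_dups_py_alt
  exact pv_core cs (PySem.List.enumerate labels 0)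
    (PySem.List.pairwise_lt_enumerate labels 0)
    (fun p hp q hq h => pv_enum_inj labels hp hq h)
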